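-- pv_equiv track=rewrite | github.com/shehrozmajeed/KAPAv1.0 | modules/lateral_movement.py | _prioritize_password_spray_targets
-- ===== SOURCE A (Python) =====
-- def _prioritize_password_spray_targets(ip_list):
--     """Prioritize targets for password spraying using ML heuristics"""
--     # Simple prioritization - in production, use trained model
--     prioritized = []
--
--     # Prioritize common server IPs
--     common_servers = [ip for ip in ip_list if ip.endswith(('.1', '.2', '.100', '.200', '.254'))]
--     prioritized.extend(common_servers)
--
--     # Add remaining IPs
--     for ip in ip_list:
--         if ip not in prioritized:
--             prioritized.append(ip)
--
--     return prioritized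
-- ===== SOURCE B (Python) =====
-- def _prioritize_password_spray_targets(ip_list):
--     """Prioritize targets for password spraying using ML heuristics"""
--     common = []
--     others = []
--     seen = set()
--     for ip in ip_list:
--         if ip.endswith(('.1', '.2', '.100', '.200', '.254')):
--             common.append(ip)
--         elif ip not in seen:
--             seen.add(ip)
--             others.append(ip)
--     return common + others
-- ===== Notes on version B (the rewrite author's own statement) =====
-- stated objective: faster
-- what changed: Replaces A's two passes (a filter pass for common-server IPs plus a second pass deduplicating against the growing result list by linear membership scans) with a single classifying pass that appends each IP to a 'common' or 'others' list, using a seen-set guard only on the non-common branch.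
import Mathlib
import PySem

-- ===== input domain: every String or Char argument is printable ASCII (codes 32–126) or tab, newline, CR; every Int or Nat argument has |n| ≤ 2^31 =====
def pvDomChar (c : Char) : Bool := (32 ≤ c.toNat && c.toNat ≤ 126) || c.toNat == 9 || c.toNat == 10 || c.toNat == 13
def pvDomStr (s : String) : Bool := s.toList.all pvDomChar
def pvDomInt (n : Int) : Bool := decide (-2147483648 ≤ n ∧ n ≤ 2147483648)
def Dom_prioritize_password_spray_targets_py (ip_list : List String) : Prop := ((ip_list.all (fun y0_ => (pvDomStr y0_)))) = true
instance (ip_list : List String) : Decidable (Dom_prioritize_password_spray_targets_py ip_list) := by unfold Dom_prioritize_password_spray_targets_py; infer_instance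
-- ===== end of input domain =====

-- B replaces A's two passes (filter + membership-scan dedup against the growing result)
-- by ONE classifying pass with a seen-set guarding only the non-common branch; objective: simpler/alternative.

-- ip.endswith(('.1', '.2', '.100', '.200', '.254'))  — tuple endswith = disjunction
def pvIsCommon (ip : String) : Bool :=
  PySem.Str.endswith ip ".1" || PySem.Str.endswith ip ".2" || PySem.Str.endswith ip ".100" ||
  PySem.Str.endswith ip ".200" || PySem.Str.endswith ip ".254"

-- ===== PORT A =====
def prioritize_password_spray_targets_py (ip_list : List String) : List String :=
  let prioritized : List String := []
  let common_servers := ip_list.filter (fun ip => pvIsCommon ip)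
  let prioritized := prioritized ++ common_servers
  ip_list.foldl (fun acc ip => if ip ∈ acc then acc else acc ++ [ip]) prioritized

-- ===== PORT B =====
def pvStepB (st : List String × PySem.Set String × List String) (ip : String) :
    List String × PySem.Set String × List String :=
  if pvIsCommon ip then (st.1 ++ [ip], st.2.1, st.2.2)
  else if PySem.Set.contains st.2.1 ip then st
  else (st.1, PySem.Set.add st.2.1 ip, st.2.2 ++ [ip])

def prioritize_password_spray_targets_py_alt (ip_list : List String) : List String :=
  let st := ip_list.foldl pvStepB ([], PySem.Set.empty, [])
  st.1 ++ st.2.2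

-- ===== PRECONDITION & SPEC =====
def Spec_prioritize_password_spray_targets_py (ip_list : List String) (out : List String) : Prop := out = prioritize_password_spray_targets_py_alt ip_list
instance (ip_list : List String) (out : List String) : Decidable (Spec_prioritize_password_spray_targets_py ip_list out) := by unfold Spec_prioritize_password_spray_targets_py; infer_instance

-- ===== CLAIM (what is proved, stated in full; the proofs are below) =====
def Claim_equal_prioritize_password_spray_targets_py : Prop := ∀ (ip_list : List String), Dom_prioritize_password_spray_targets_py ip_list → Spec_prioritize_password_spray_targets_py ip_list (prioritize_password_spray_targets_py ip_list)

-- ===== LEMMAS AND PROOFS =====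

-- reference accumulator for the "others" (non-common, first occurrences) part
def pvG (o : List String) (ip : String) : List String :=
  if pvIsCommon ip then o else if ip ∈ o then o else o ++ [ip]

lemma pvA_loop (l : List String) : ∀ (C o : List String),
    (∀ x ∈ C, pvIsCommon x = true) →
    (∀ x ∈ l, pvIsCommon x = true → x ∈ C) →
    l.foldl (fun acc ip => if ip ∈ acc then acc else acc ++ [ip]) (C ++ o)
      = C ++ l.foldl pvG o := by
  induction l with
  | nil => intro C o _ _; rfl
  | cons ip l ih =>
    intro C o hC hl
    simp only [List.foldl_cons]
    by_cases hc : pvIsCommon ip = true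
    · have hmem : ip ∈ C ++ o := List.mem_append.2 (Or.inl (hl ip (by simp) hc))
      rw [if_pos hmem]
      have : pvG o ip = o := by simp [pvG, hc]
      rw [ih C o hC (fun x hx => hl x (by simp [hx]))]
      simp [this]
    · have hnc : ip ∉ C := fun h => hc (hC ip h)
      have hg : pvG o ip = if ip ∈ o then o else o ++ [ip] := by
        simp [pvG, hc]
      by_cases ho : ip ∈ o
      · have hmem : ip ∈ C ++ o := List.mem_append.2 (Or.inr ho)
        rw [if_pos hmem, ih C o hC (fun x hx => hl x (by simp [hx]))]
        simp [hg, ho]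
      · have hmem : ip ∉ C ++ o := by
          simp [List.mem_append, hnc, ho]
        rw [if_neg hmem]
        have : C ++ o ++ [ip] = C ++ (o ++ [ip]) := by simp
        rw [this, ih C (o ++ [ip]) hC (fun x hx => hl x (by simp [hx]))]
        simp [hg, ho]

lemma pvB_loop (l : List String) : ∀ (c : List String) (seen : PySem.Set String) (o : List String),
    (∀ x, x ∈ seen ↔ x ∈ o) →
    l.foldl pvStepB (c, seen, o)
      = (c ++ l.filter (fun ip => pvIsCommon ip),
         (l.foldl pvStepB (c, seen, o)).2.1,
         l.foldl pvG o) := by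
  induction l with
  | nil => intro c seen o _; simp
  | cons ip l ih =>
    intro c seen o hinv
    simp only [List.foldl_cons, List.filter_cons]
    by_cases hc : pvIsCommon ip = true
    · have hstep : pvStepB (c, seen, o) ip = (c ++ [ip], seen, o) := by
        simp [pvStepB, hc]
      have hg : pvG o ip = o := by simp [pvG, hc]
      rw [hstep, ih (c ++ [ip]) seen o hinv]
      simp [hc, hg]
    · by_cases hs : ip ∈ seen
      · have ho : ip ∈ o := (hinv ip).1 hs
        have hstep : pvStepB (c, seen, o) ip = (c, seen, o) := by
          simp [pvStepB, hc, hs]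
        have hg : pvG o ip = o := by simp [pvG, hc, ho]
        rw [hstep, ih c seen o hinv]
        simp [hc, hg]
      · have ho : ip ∉ o := fun h => hs ((hinv ip).2 h)
        have hstep : pvStepB (c, seen, o) ip = (c, PySem.Set.add seen ip, o ++ [ip]) := by
          simp [pvStepB, hc, hs]
        have hg : pvG o ip = o ++ [ip] := by simp [pvG, hc, ho]
        have hinv' : ∀ x, x ∈ PySem.Set.add seen ip ↔ x ∈ o ++ [ip] := by
          intro x
          rw [PySem.Set.mem_add]
          simp only [List.mem_append, List.mem_singleton, hinv x]
        rw [hstep, ih c (PySem.Set.add seen ip) (o ++ [ip]) hinv']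
        simp [hc, hg]

-- ===== VERDICT (by name: the statement is the Claim_ definition above) =====
theorem prioritize_password_spray_targets_py_spec : Claim_equal_prioritize_password_spray_targets_py := by
  intro ip_list _
  unfold Spec_prioritize_password_spray_targets_py
  unfold prioritize_password_spray_targets_py prioritize_password_spray_targets_py_alt
  simp only []
  rw [pvB_loop ip_list [] PySem.Set.empty []
      (by intro x; simp [PySem.Set.empty])]
  have hA := pvA_loop ip_list (ip_list.filter (fun ip => pvIsCommon ip)) []
    (by intro x hx; exact (List.mem_filter.1 hx).2)
    (by intro x hx h; exact List.mem_filter.2 ⟨hx, h⟩)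
  simpa using hA
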